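-- pv_equiv track=rewrite | github.com/masalomon01/Kata | chameleon unity.py | chameleon
-- ===== SOURCE A (Python) =====
-- def check_input(chameleons):
-- 	check = [1 if e == 0 else 0 for e in chameleons]
-- 	if sum(check) >= 2:
-- 		return False
--
-- def chameleon(chameleons, desiredColor):
-- 	desired, moves  = chameleons[desiredColor], 0
-- 	if check_input(chameleons) == False:
-- 		if chameleons[desiredColor]> 0:
-- 			return 0
-- 		else:
-- 			return -1
-- 	chameleons.pop(desiredColor)
-- 	small, big = min(chameleons), max(chameleons)
-- 	while small < big:
-- 		small += 2
-- 		big -= 1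
-- 		desired -= 1
-- 		moves += 1
-- 	if small == big:
-- 		return small + moves
-- 	else:
-- 		return -1
-- ===== SOURCE B (Python) =====
-- def chameleon(chameleons, desiredColor):
--     v = chameleons[desiredColor]
--     if sum(1 for e in chameleons if e == 0) >= 2:
--         return 0 if v > 0 else -1
--     i = desiredColor if desiredColor >= 0 else desiredColor + len(chameleons)
--     rest = chameleons[:i] + chameleons[i + 1:]
--     lo, hi = min(rest), max(rest)
--     return hi if (hi - lo) % 3 == 0 else -1
-- ===== Notes on version B (the rewrite author's own statement) =====
-- stated objective: faster
-- what changed: B replaces A's step-by-step simulation loop (one iteration per unit of the min/max gap) by the closed form: after removing the indexed element, the colors unify iff (max-min) is divisible by 3, and A's returned value is then exactly max; B also does not mutate the input list, while A pops from it.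
import Mathlib
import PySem

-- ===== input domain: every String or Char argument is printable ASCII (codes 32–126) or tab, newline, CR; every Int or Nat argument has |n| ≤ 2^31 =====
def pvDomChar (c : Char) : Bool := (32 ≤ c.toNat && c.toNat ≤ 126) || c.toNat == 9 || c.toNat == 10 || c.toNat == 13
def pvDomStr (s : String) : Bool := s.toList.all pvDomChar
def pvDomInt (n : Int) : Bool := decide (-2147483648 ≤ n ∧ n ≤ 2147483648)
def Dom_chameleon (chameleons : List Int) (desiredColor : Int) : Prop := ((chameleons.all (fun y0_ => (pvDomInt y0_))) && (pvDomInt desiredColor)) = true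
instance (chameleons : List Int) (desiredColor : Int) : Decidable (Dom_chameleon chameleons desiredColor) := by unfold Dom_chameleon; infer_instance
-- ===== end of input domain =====

-- B replaces A's step-simulation while-loop by the closed form ((max-min) divisible by 3 → max, else -1);
-- equivalence is about the RETURN value only: A pops from its input list, B does not mutate it.


-- ===== PORT A =====
-- check = [1 if e == 0 else 0 for e in chameleons]; if sum(check) >= 2: return False   (else Python returns None)
def check_input (chameleons : List Int) : Option Bool :=
  let check := chameleons.map (fun e => if e == 0 then (1 : Int) else 0)
  if 2 ≤ check.sum then some false else none

-- the 'while small < big' loop, carrying (small, big, desired, moves) exactly as A does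
def chamLoop (small big desired moves : Int) : Int × Int × Int × Int :=
  if small < big then chamLoop (small + 2) (big - 1) (desired - 1) (moves + 1)
  else (small, big, desired, moves)
termination_by (big - small).toNat
decreasing_by omega

def chameleon (chameleons : List Int) (desiredColor : Int) : Int :=
  match PySem.List.pyGet? chameleons desiredColor with
  | none => 0      -- Python raises IndexError here (excluded by Pre_)
  | some desired =>
    if check_input chameleons = some false then
      if desired > 0 then 0 else -1
    else
      match PySem.List.pop? chameleons desiredColor with
      | none => 0  -- unreachable: the index was valid above
      | some (_, rest) =>
        match PySem.List.min? rest (fun x => x), PySem.List.max? rest (fun x => x) with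
        | some small, some big =>
          let r := chamLoop small big desired 0
          if r.1 = r.2.1 then r.1 + r.2.2.2 else -1
        | _, _ => 0  -- Python min([])/max([]) raises ValueError (excluded by Pre_)

-- ===== PORT B =====
def chameleon_alt (chameleons : List Int) (desiredColor : Int) : Int :=
  (PySem.List.pyGet? chameleons desiredColor).elim 0 (fun v =>  -- none: Python IndexError (excluded by Pre_)
    if 2 ≤ chameleons.countP (fun e => e == 0) then
      if v > 0 then 0 else -1
    else
      let i : Int := if desiredColor ≥ 0 then desiredColor else desiredColor + chameleons.length
      let rest := PySem.List.slice chameleons none (some i) ++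
                  PySem.List.slice chameleons (some (i + 1)) none
      (PySem.List.min? rest (fun x => x)).elim 0 (fun lo =>   -- none: Python min([]) ValueError (excluded by Pre_)
        (PySem.List.max? rest (fun x => x)).elim 0 (fun hi =>
          if PySem.Int.mod (hi - lo) 3 = 0 then hi else -1)))

-- ===== PRECONDITION & SPEC =====
-- Pre_ excludes exactly the inputs where the Python A raises: an out-of-range index (IndexError),
-- and lists whose pop leaves an empty list while the two-zeros branch is not taken (min([]) ValueError).
def Pre_chameleon (chameleons : List Int) (desiredColor : Int) : Prop :=
  PySem.Raise.InRange chameleons.length desiredColor ∧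
  (2 ≤ chameleons.countP (fun e => e == 0) ∨ 2 ≤ chameleons.length)
instance (chameleons : List Int) (desiredColor : Int) : Decidable (Pre_chameleon chameleons desiredColor) := by
  unfold Pre_chameleon PySem.Raise.InRange; infer_instance

def pvWitness_chameleon : List Int × Int := ([1, 4, 4], 0)

def Spec_chameleon (chameleons : List Int) (desiredColor : Int) (out : Int) : Prop := out = chameleon_alt chameleons desiredColor
instance (chameleons : List Int) (desiredColor : Int) (out : Int) : Decidable (Spec_chameleon chameleons desiredColor out) := by unfold Spec_chameleon; infer_instance

-- ===== CLAIM (what is proved, stated in full; the proofs are below) =====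
def Claim_equal_chameleon : Prop := ∀ (chameleons : List Int) (desiredColor : Int), Dom_chameleon chameleons desiredColor → Pre_chameleon chameleons desiredColor → Spec_chameleon chameleons desiredColor (chameleon chameleons desiredColor)

-- ===== LEMMAS AND PROOFS =====

-- A's while-loop followed by its 'small == big' check, in closed form.
lemma chamLoop_result (small big desired moves : Int) :
    (if (chamLoop small big desired moves).1 = (chamLoop small big desired moves).2.1
     then (chamLoop small big desired moves).1 + (chamLoop small big desired moves).2.2.2 else -1)
    = if small ≤ big ∧ (big - small) % 3 = 0 then big + moves else -1 := by
  induction small, big, desired, moves using chamLoop.induct with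
  | case1 s b d m h ih =>
    rw [chamLoop]
    simp only [if_pos h] at *
    rw [ih]
    split_ifs <;> omega
  | case2 s b d m h =>
    rw [chamLoop]
    simp only [if_neg h]
    split_ifs <;> omega

-- ===== VERDICT (by name: the statement is the Claim_ definition above) =====
theorem chameleon_spec : Claim_equal_chameleon := by
  intro chs d _ hpre
  obtain ⟨hin, hrest⟩ := hpre
  unfold Spec_chameleon
  -- the index is valid, so pyGet? returns some value
  cases hg : PySem.List.pyGet? chs d with
  | none => exact absurd ((PySem.List.pyGet?_eq_none_iff chs d).mp hg) (not_not_intro hin)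
  | some v =>
  simp only [chameleon, chameleon_alt, hg, Option.elim_some]
  -- the two branch tests agree: sum of the 0/1 list IS the count of zeros
  have hcheck : (check_input chs = some false) ↔ 2 ≤ chs.countP (fun e => e == 0) := by
    simp only [check_input, PySem.List.sum_map_ite_one_zero]
    split_ifs with h
    · exact iff_of_true rfl (by exact_mod_cast h)
    · exact iff_of_false (by simp) (by exact_mod_cast h)
  by_cases hz : 2 ≤ chs.countP (fun e => e == 0)
  · simp only [if_pos (hcheck.mpr hz), if_pos hz]
  · simp only [if_neg (fun h => hz (hcheck.mp h)), if_neg hz]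
    have hlen : 2 ≤ chs.length := by
      cases hrest with
      | inl h => exact absurd h hz
      | inr h => exact h
    obtain ⟨hl, hr⟩ := hin
    -- the normalized index
    set i : Int := if d ≥ 0 then d else d + chs.length with hi
    have hi0 : 0 ≤ i := by rw [hi]; split_ifs <;> omega
    have hilt : i < chs.length := by rw [hi]; split_ifs <;> omega
    have hk : PySem.List.pyIdx? chs.length d = some i.toNat := by
      simp only [PySem.List.pyIdx?]
      split_ifs <;> congr 1
      · rw [hi, if_pos (by omega)]
      · rw [hi, if_neg (by omega)]; omega
    -- A's pop produces exactly B's take-append-drop remainder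
    have hpop : PySem.List.pop? chs d
        = some (chs[i.toNat]'(by omega), chs.eraseIdx i.toNat) := by
      simp only [PySem.List.pop?, hk, Option.bind_some,
        List.getElem?_eq_getElem (show i.toNat < chs.length by omega), Option.map_some]
    have hrest_eq : PySem.List.slice chs none (some i) ++ PySem.List.slice chs (some (i + 1)) none
        = chs.eraseIdx i.toNat := by
      rw [PySem.List.slice_to chs hi0, PySem.List.slice_from chs (by omega : (0:Int) ≤ i + 1),
        List.eraseIdx_eq_take_drop_succ, show (i + 1).toNat = i.toNat + 1 by omega]
    have hne : chs.eraseIdx i.toNat ≠ [] := by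
      intro h
      have := congrArg List.length h
      rw [List.length_eraseIdx_of_lt (show i.toNat < chs.length by omega)] at this
      simp at this
      omega
    cases hmin : PySem.List.min? (chs.eraseIdx i.toNat) (fun x => x) with
    | none => rw [PySem.List.min?_eq_none_iff] at hmin; exact absurd hmin hne
    | some lo =>
    cases hmax : PySem.List.max? (chs.eraseIdx i.toNat) (fun x => x) with
    | none => rw [PySem.List.max?_eq_none_iff] at hmax; exact absurd hmax hne
    | some hi' =>
    have hle : lo ≤ hi' := PySem.List.min?_isMin hmin hi' (PySem.List.max?_mem hmax)
    simp only [hpop, hrest_eq, hmin, hmax, Option.elim_some]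
    rw [chamLoop_result]
    rw [PySem.Int.mod_eq_emod_of_pos (by omega : (0:Int) < 3)]
    split_ifs <;> omega
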